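-- pv_equiv track=rewrite | github.com/Bandit16/Steganography | main.py | analyze_consecutive_bits
-- ===== SOURCE A (Python) =====
-- def analyze_consecutive_bits(binary_array):
--     max_consecutive_ones = 0
--     max_consecutive_zeros = 0
--     current_ones = 0
--     current_zeros = 0
--
--     for bit in binary_array:
--         if bit == 1:
--             current_ones += 1
--             current_zeros = 0
--         else:
--             current_zeros += 1
--             current_ones = 0
--
--         if current_ones > max_consecutive_ones:
--             max_consecutive_ones = current_ones
--         if current_zeros > max_consecutive_zeros:
--             max_consecutive_zeros = current_zeros
--
--     return max_consecutive_ones, max_consecutive_zeros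
-- ===== SOURCE B (Python) =====
-- def analyze_consecutive_bits(binary_array):
--     # Separator-position method: a maximal run of ones is exactly the gap between
--     # two consecutive non-one positions (with sentinels -1 and len); symmetrically
--     # for zeros with the positions of the ones.
--     n = len(binary_array)
--     non_ones = [-1] + [i for i, b in enumerate(binary_array) if b != 1] + [n]
--     ones = [-1] + [i for i, b in enumerate(binary_array) if b == 1] + [n]
--     max_consecutive_ones = max(b - a - 1 for a, b in zip(non_ones, non_ones[1:]))
--     max_consecutive_zeros = max(b - a - 1 for a, b in zip(ones, ones[1:]))
--     return max_consecutive_ones, max_consecutive_zeros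
-- ===== Notes on version B (the rewrite author's own statement) =====
-- stated objective: alternative
-- what changed: Replaces A's running counter/reset loop with a separator-position method: build the index lists of the non-one and of the one elements (with sentinels -1 and len), and read each maximum run off as the largest gap between consecutive separator positions.
import Mathlib
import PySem

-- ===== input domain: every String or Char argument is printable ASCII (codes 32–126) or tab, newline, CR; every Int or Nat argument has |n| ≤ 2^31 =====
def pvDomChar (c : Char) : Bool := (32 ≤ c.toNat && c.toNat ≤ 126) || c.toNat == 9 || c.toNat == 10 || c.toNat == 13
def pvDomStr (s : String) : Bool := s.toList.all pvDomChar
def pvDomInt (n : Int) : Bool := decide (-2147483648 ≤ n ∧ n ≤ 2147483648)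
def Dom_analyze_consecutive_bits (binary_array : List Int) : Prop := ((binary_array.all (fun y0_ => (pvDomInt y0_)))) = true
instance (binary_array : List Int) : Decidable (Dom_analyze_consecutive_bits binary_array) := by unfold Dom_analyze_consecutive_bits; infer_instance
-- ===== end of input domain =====

-- B replaces A's counter/reset loop by a separator-position computation (index lists + max adjacent gap); same O(n) cost, different decomposition.

-- ===== PORT A =====
-- A: one pass keeping current_ones/current_zeros counters, resetting the opposite one each step.
def pvStepA (s : Int × Int × Int × Int) (bit : Int) : Int × Int × Int × Int :=
  let mo := s.1; let mz := s.2.1; let co := s.2.2.1; let cz := s.2.2.2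
  let co := if bit == 1 then co + 1 else 0
  let cz := if bit == 1 then 0 else cz + 1
  let mo := if co > mo then co else mo
  let mz := if cz > mz then cz else mz
  (mo, mz, co, cz)

def analyze_consecutive_bits (binary_array : List Int) : Int × Int :=
  let s := binary_array.foldl pvStepA (0, 0, 0, 0)
  (s.1, s.2.1)

-- ===== PORT B =====
-- B: positions of the separators (with sentinels -1 and n), then the maximum adjacent gap.
-- max(b - a - 1 for a, b in zip(pos, pos[1:])): the gap list always has at least one element
-- (pos has ≥ 2 entries), so Python's max never raises; the .getD 0 branch is unreachable.
def pvMaxGap (pos : List Int) : Int :=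
  (PySem.List.max? ((pos.zip (PySem.List.slice pos (some 1) none)).map
      (fun ab => ab.2 - ab.1 - 1)) (fun y => y)).getD 0

def analyze_consecutive_bits_alt (binary_array : List Int) : Int × Int :=
  let n : Int := binary_array.length
  let non_ones := -1 :: ((PySem.List.enumerate binary_array 0).filter
      (fun p => !(p.2 == 1))).map (fun p => p.1) ++ [n]
  let ones := -1 :: ((PySem.List.enumerate binary_array 0).filter
      (fun p => p.2 == 1)).map (fun p => p.1) ++ [n]
  (pvMaxGap non_ones, pvMaxGap ones)

-- ===== PRECONDITION & SPEC =====
def Spec_analyze_consecutive_bits (binary_array : List Int) (out : Int × Int) : Prop := out = analyze_consecutive_bits_alt binary_array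
instance (binary_array : List Int) (out : Int × Int) : Decidable (Spec_analyze_consecutive_bits binary_array out) := by unfold Spec_analyze_consecutive_bits; infer_instance

-- ===== CLAIM (what is proved, stated in full; the proofs are below) =====
def Claim_equal_analyze_consecutive_bits : Prop := ∀ (binary_array : List Int), Dom_analyze_consecutive_bits binary_array → Spec_analyze_consecutive_bits binary_array (analyze_consecutive_bits binary_array)

-- ===== LEMMAS AND PROOFS =====

-- Common spec V c xs cur: max run length of elements satisfying c, given cur elements of the
-- current run already seen immediately before xs.
def pvV (c : Int → Bool) : List Int → Int → Int
  | [], cur => cur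
  | x :: t, cur => if c x then pvV c t (cur + 1) else max cur (pvV c t 0)

lemma pvV_ge (c : Int → Bool) : ∀ (xs : List Int) (cur : Int), cur ≤ pvV c xs cur := by
  intro xs
  induction xs with
  | nil => intro cur; simp [pvV]
  | cons x t ih =>
    intro cur
    by_cases h : c x = true
    · simpa [pvV, h] using le_trans (by omega) (ih (cur + 1))
    · simp [pvV, h]

-- A's fold computes V for both classes at once.
lemma pvA_fold : ∀ (xs : List Int) (mo mz co cz : Int), 0 ≤ co → co ≤ mo → 0 ≤ cz → cz ≤ mz →
    (xs.foldl pvStepA (mo, mz, co, cz)).1 = max mo (pvV (fun b => b == 1) xs co) ∧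
    (xs.foldl pvStepA (mo, mz, co, cz)).2.1 = max mz (pvV (fun b => !(b == 1)) xs cz) := by
  intro xs
  induction xs with
  | nil =>
    intro mo mz co cz _ h1 _ h2
    constructor <;> simp [pvV] <;> omega
  | cons x t ih =>
    intro mo mz co cz hco hcomo hcz hczmz
    by_cases h : (x == 1) = true
    · have hstep : pvStepA (mo, mz, co, cz) x = (max mo (co + 1), mz, co + 1, 0) := by
        simp [pvStepA, h]; constructor <;> omega
      have hih := ih (max mo (co + 1)) mz (co + 1) 0 (by omega) (by omega) le_rfl (by omega)
      have e1 : pvV (fun b => b == 1) (x :: t) co = pvV (fun b => b == 1) t (co + 1) := by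
        simp [pvV, h]
      have e2 : pvV (fun b => !(b == 1)) (x :: t) cz = max cz (pvV (fun b => !(b == 1)) t 0) := by
        simp [pvV, h]
      have hge := pvV_ge (fun b => b == 1) t (co + 1)
      rw [List.foldl_cons, hstep]
      exact ⟨by rw [hih.1, e1]; omega, by rw [hih.2, e2]; omega⟩
    · have h' : (x == 1) = false := by simpa using h
      have hstep : pvStepA (mo, mz, co, cz) x = (mo, max mz (cz + 1), 0, cz + 1) := by
        simp [pvStepA, h']; constructor <;> omega
      have hih := ih mo (max mz (cz + 1)) 0 (cz + 1) le_rfl (by omega) (by omega) (by omega)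
      have e1 : pvV (fun b => b == 1) (x :: t) co = max co (pvV (fun b => b == 1) t 0) := by
        simp [pvV, h']
      have e2 : pvV (fun b => !(b == 1)) (x :: t) cz = pvV (fun b => !(b == 1)) t (cz + 1) := by
        simp [pvV, h']
      have hge := pvV_ge (fun b => !(b == 1)) t (cz + 1)
      rw [List.foldl_cons, hstep]
      exact ⟨by rw [hih.1, e1]; omega, by rw [hih.2, e2]; omega⟩

-- Separator positions of xs (elements where q holds), 0-based from offset s.
def pvPosF (q : Int → Bool) : List Int → Int → List Int
  | [], _ => []
  | x :: t, s => if q x then s :: pvPosF q t (s + 1) else pvPosF q t (s + 1)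

lemma pvPos_enum (q : Int → Bool) : ∀ (xs : List Int) (s : Int),
    ((PySem.List.enumerate xs s).filter (fun p => q p.2)).map (fun p => p.1) = pvPosF q xs s := by
  intro xs
  induction xs with
  | nil => intro s; simp [PySem.List.enumerate_nil, pvPosF]
  | cons x t ih =>
    intro s
    rw [PySem.List.enumerate_cons]
    by_cases h : q x = true
    · simp [h, pvPosF, ih]
    · simp [h, pvPosF, ih]

-- Max adjacent gap over prev :: qs ++ [last], top-down.
def pvMG : Int → List Int → Int → Int
  | prev, [], last => last - prev - 1
  | prev, q :: qs, last => max (q - prev - 1) (pvMG q qs last)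

lemma pvGap_fold : ∀ (qs : List Int) (prev last x : Int),
    ((((prev :: (qs ++ [last])).zip (qs ++ [last])).map
        (fun ab => ab.2 - ab.1 - 1)).foldl max x) = max x (pvMG prev qs last) := by
  intro qs
  induction qs with
  | nil => intro prev last x; simp [pvMG]
  | cons q qs ih =>
    intro prev last x
    simp only [List.cons_append, List.zip_cons_cons, List.map_cons, List.foldl_cons]
    rw [ih q last (max x (q - prev - 1))]
    simp [pvMG, max_assoc]

lemma pvMaxGap_eq : ∀ (qs : List Int) (prev last : Int),
    pvMaxGap (prev :: qs ++ [last]) = pvMG prev qs last := by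
  intro qs prev last
  unfold pvMaxGap
  rw [PySem.List.slice_from_one]
  cases qs with
  | nil =>
    simp [PySem.List.max?_id_cons, pvMG]
  | cons q qs =>
    simp only [List.cons_append, List.tail_cons, List.zip_cons_cons, List.map_cons,
      PySem.List.max?_id_cons, Option.getD_some]
    rw [pvGap_fold qs q last (q - prev - 1)]
    simp [pvMG]

-- The max gap between consecutive separators equals the max run of the complementary class.
lemma pvMG_posF (q c : Int → Bool) (hqc : ∀ x, q x = !(c x)) :
    ∀ (xs : List Int) (i0 prev : Int),
    pvMG prev (pvPosF q xs i0) (i0 + xs.length) = pvV c xs (i0 - prev - 1) := by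
  intro xs
  induction xs with
  | nil => intro i0 prev; simp [pvPosF, pvMG, pvV]
  | cons x t ih =>
    intro i0 prev
    have hlen : (i0 + ((x :: t).length : Int)) = (i0 + 1) + (t.length : Int) := by
      push_cast [List.length_cons]; ring
    by_cases h : c x = true
    · have hq : q x = false := by rw [hqc]; simp [h]
      rw [show pvPosF q (x :: t) i0 = pvPosF q t (i0 + 1) from by simp [pvPosF, hq],
          show pvV c (x :: t) (i0 - prev - 1) = pvV c t ((i0 - prev - 1) + 1) from by
            simp [pvV, h],
          hlen, ih (i0 + 1) prev]
      congr 1; ring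
    · have h' : c x = false := by simpa using h
      have hq : q x = true := by rw [hqc]; simp [h']
      rw [show pvPosF q (x :: t) i0 = i0 :: pvPosF q t (i0 + 1) from by simp [pvPosF, hq],
          show pvV c (x :: t) (i0 - prev - 1) = max (i0 - prev - 1) (pvV c t 0) from by
            simp [pvV, h'],
          hlen]
      have := ih (i0 + 1) i0
      norm_num at this
      simp [pvMG, this]

-- ===== VERDICT (by name: the statement is the Claim_ definition above) =====
theorem analyze_consecutive_bits_spec : Claim_equal_analyze_consecutive_bits := by
  intro xs _
  unfold Spec_analyze_consecutive_bits analyze_consecutive_bits analyze_consecutive_bits_alt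
  dsimp only
  rw [pvPos_enum (fun b => !(b == 1)) xs 0, pvPos_enum (fun b => b == 1) xs 0,
      pvMaxGap_eq, pvMaxGap_eq]
  have hA := pvA_fold xs 0 0 0 0 le_rfl le_rfl le_rfl le_rfl
  have h1 : pvMG (-1) (pvPosF (fun b => !(b == 1)) xs 0) (xs.length : Int)
      = pvV (fun b => b == 1) xs 0 := by
    simpa using pvMG_posF (fun b => !(b == 1)) (fun b => b == 1) (by intro x; simp) xs 0 (-1)
  have h2 : pvMG (-1) (pvPosF (fun b => b == 1) xs 0) (xs.length : Int)
      = pvV (fun b => !(b == 1)) xs 0 := by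
    simpa using pvMG_posF (fun b => b == 1) (fun b => !(b == 1)) (by intro x; simp) xs 0 (-1)
  have g1 := pvV_ge (fun b => b == 1) xs 0
  have g2 := pvV_ge (fun b => !(b == 1)) xs 0
  refine Prod.ext ?_ ?_
  · rw [hA.1, h1]; omega
  · rw [hA.2, h2]; omega
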